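-- pv_equiv track=rewrite | github.com/Soundflog/number-system-translation | calculate_all.py | hex_subtract
-- ===== SOURCE A (Python) =====
-- def hex_subtract(hex1, hex2):
--     """Вычитание шестнадцатеричных чисел (без отрицательных результатов)."""
--     max_len = max(len(hex1), len(hex2))
--     hex1 = hex1.zfill(max_len)
--     hex2 = hex2.zfill(max_len)
--
--     result = []
--     borrow = 0
--     hex_map = {str(i): i for i in range(10)}
--     hex_map.update({chr(i + 55): i for i in range(10, 16)})
--     reverse_map = {v: k for k, v in hex_map.items()}
--
--     for i in range(max_len - 1, -1, -1):
--         h1 = hex_map[hex1[i].upper()]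
--         h2 = hex_map[hex2[i].upper()] + borrow
--
--         if h1 >= h2:
--             result.append(reverse_map[h1 - h2])
--             borrow = 0
--         else:
--             result.append(reverse_map[h1 + 16 - h2])
--             borrow = 1
--
--     # Удаление ведущих нулей
--     while len(result) > 1 and result[-1] == '0':
--         result.pop()
--
--     return ''.join(reversed(result))
-- ===== SOURCE B (Python) =====
-- def hex_subtract(hex1, hex2):
--     digits = "0123456789ABCDEF"
--
--     def parse(s):
--         n = 0
--         for ch in s:
--             n = n * 16 + digits.index(ch.upper())
--         return n
--
--     max_len = max(len(hex1), len(hex2))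
--     d = (parse(hex1) - parse(hex2)) % 16 ** max_len
--     out = ""
--     for _ in range(max_len):
--         out = digits[d % 16] + out
--         d //= 16
--     return out[:-1].lstrip("0") + out[-1:]
-- ===== Notes on version B (the rewrite author's own statement) =====
-- stated objective: alternative
-- what changed: Replaces the per-digit borrow-propagation loop and the two dictionaries with whole-number arithmetic over a single digit string: parse both operands via str.index into integers, compute (n1 - n2) mod 16**max_len, re-emit the digits by recursive divmod, and strip leading zeros with a slice + lstrip instead of the pop loop.
import Mathlib
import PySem

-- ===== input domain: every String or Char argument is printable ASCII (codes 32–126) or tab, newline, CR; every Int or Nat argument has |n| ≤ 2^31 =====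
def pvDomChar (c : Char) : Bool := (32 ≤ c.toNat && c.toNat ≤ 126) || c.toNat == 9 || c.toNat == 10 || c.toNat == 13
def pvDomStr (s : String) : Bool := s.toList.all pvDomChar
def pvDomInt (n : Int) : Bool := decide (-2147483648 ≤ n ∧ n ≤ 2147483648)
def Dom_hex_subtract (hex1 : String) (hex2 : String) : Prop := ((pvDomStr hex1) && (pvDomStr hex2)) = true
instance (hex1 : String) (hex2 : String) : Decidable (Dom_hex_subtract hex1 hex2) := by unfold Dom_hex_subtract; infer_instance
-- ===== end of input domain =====

-- B replaces A's per-digit borrow loop and both dictionaries by whole-number arithmetic over a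
-- single digit string ((n1 - n2) mod 16**max_len, digits re-emitted by recursive divmod, leading
-- zeros removed by a slice + lstrip): an alternative algorithm, not claimed faster.

-- ===== PORT A =====
-- hex_map = {str(i): i for i in range(10)}; hex_map.update({chr(i + 55): i for i in range(10, 16)})
-- (single-character Python strings are ported as Char; str(i) for 0 ≤ i ≤ 9 is exactly chr(48 + i))
def hexMapA : PySem.Dict Char Int :=
  let d := (PySem.List.pyRange 0 10 1).foldl
      (fun d i => d.insert (Char.ofNat (48 + i).toNat) i) PySem.Dict.empty
  (PySem.List.pyRange 10 16 1).foldl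
      (fun d i => d.insert (Char.ofNat (55 + i).toNat) i) d

-- reverse_map = {v: k for k, v in hex_map.items()}
def revMapA : PySem.Dict Int Char :=
  hexMapA.items.foldl (fun d kv => d.insert kv.2 kv.1) PySem.Dict.empty

-- while len(result) > 1 and result[-1] == '0': result.pop()
def stripLoopA (l : List Char) : List Char :=
  if 1 < l.length ∧ l.getLast? = some '0' then stripLoopA l.dropLast else l
termination_by l.length
decreasing_by simp only [List.length_dropLast]; omega

-- hex_map[...] / reverse_map[...] raise KeyError on a missing key: ported as getD with a junk
-- default; exactly those inputs are excluded by Pre_hex_subtract below.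
def hex_subtract (hex1 : String) (hex2 : String) : String :=
  let max_len : Int := max (PySem.Str.len hex1) (PySem.Str.len hex2)
  let h1 := PySem.Chars.zfill hex1.toList max_len
  let h2 := PySem.Chars.zfill hex2.toList max_len
  let st := (PySem.List.pyRange (max_len - 1) (-1) (-1)).foldl
    (fun (st : List Char × Int) i =>
      let d1 := hexMapA.getD (PySem.Chars.upperChar (PySem.List.pyGetD h1 i ' ')) 0
      let d2 := hexMapA.getD (PySem.Chars.upperChar (PySem.List.pyGetD h2 i ' ')) 0 + st.2
      if d1 ≥ d2 then (st.1 ++ [revMapA.getD (d1 - d2) ' '], (0 : Int))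
      else (st.1 ++ [revMapA.getD (d1 + 16 - d2) ' '], 1)) ([], 0)
  String.ofList (stripLoopA st.1).reverse

-- ===== PORT B =====
-- digits = "0123456789ABCDEF"
def hexDigitsB : List Char :=
  ['0','1','2','3','4','5','6','7','8','9','A','B','C','D','E','F']

-- digits.index(ch.upper()); the none case is ValueError, excluded by Pre_hex_subtract
def digitValB (c : Char) : Int :=
  ((PySem.List.index? hexDigitsB (PySem.Chars.upperChar c)).getD 0 : Nat)

-- def parse(s): n = 0; for ch in s: n = n * 16 + digits.index(ch.upper()); return n
def parseB (s : List Char) : Int :=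
  s.foldl (fun n c => n * 16 + digitValB c) 0

-- out = ""; for _ in range(max_len): out = digits[d % 16] + out; d //= 16
def emitLoopB (maxlen : Int) (d : Int) : List Char :=
  ((PySem.List.pyRange 0 maxlen 1).foldl
    (fun (st : List Char × Int) _ =>
      (PySem.List.pyGetD hexDigitsB (PySem.Int.mod st.2 16) ' ' :: st.1,
       PySem.Int.floordiv st.2 16)) ([], d)).1

-- out[:-1].lstrip("0") + out[-1:]; lstrip("0") is ported by hand as dropWhile (· == '0'),
-- which is exact: it removes precisely the leading '0' characters.
def hex_subtract_alt (hex1 : String) (hex2 : String) : String :=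
  let max_len : Int := max (PySem.Str.len hex1) (PySem.Str.len hex2)
  let out := emitLoopB max_len
    (PySem.Int.mod (parseB hex1.toList - parseB hex2.toList) (16 ^ max_len.toNat))
  String.ofList
    ((PySem.List.slice out none (some (-1))).dropWhile (· == '0')
      ++ PySem.List.slice out (some (-1)) none)

-- ===== PRECONDITION & SPEC =====
def hexChars : List Char :=
  ['0','1','2','3','4','5','6','7','8','9','A','B','C','D','E','F','a','b','c','d','e','f']

-- Pre_ excludes exactly the inputs containing a non-hex-digit character, on which A (and B) raise.
def Pre_hex_subtract (hex1 : String) (hex2 : String) : Prop :=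
  (hex1.toList.all (fun c => hexChars.contains c)
    && hex2.toList.all (fun c => hexChars.contains c)) = true
instance (hex1 : String) (hex2 : String) : Decidable (Pre_hex_subtract hex1 hex2) := by
  unfold Pre_hex_subtract; infer_instance

def pvWitness_hex_subtract : String × String := ("A1", "f")

def Spec_hex_subtract (hex1 : String) (hex2 : String) (out : String) : Prop := out = hex_subtract_alt hex1 hex2
instance (hex1 : String) (hex2 : String) (out : String) : Decidable (Spec_hex_subtract hex1 hex2 out) := by unfold Spec_hex_subtract; infer_instance

-- ===== CLAIM (what is proved, stated in full; the proofs are below) =====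
def Claim_equal_hex_subtract : Prop := ∀ (hex1 : String) (hex2 : String), Dom_hex_subtract hex1 hex2 → Pre_hex_subtract hex1 hex2 → Spec_hex_subtract hex1 hex2 (hex_subtract hex1 hex2)

-- ===== LEMMAS AND PROOFS =====

-- proof-side views of A's two table lookups
def dv (c : Char) : Int := hexMapA.getD (PySem.Chars.upperChar c) 0
def rv (d : Int) : Char := revMapA.getD d ' '

-- the low n base-16 digits of m, LSB first (Euclidean; = Python's divmod after the nonneg wrap)
def D16 : Int → Nat → List Int
  | _, 0 => []
  | m, n + 1 => (m % 16) :: D16 (m / 16) n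

-- value of a digit string, MSB first (what B's parse loop computes, via dv)
def valM (l : List Char) : Int := l.foldl (fun a c => a * 16 + dv c) 0

-- value of a digit string, LSB first
def valL : List Char → Int
  | [] => 0
  | c :: t => dv c + 16 * valL t

theorem dv_def (c : Char) : hexMapA.getD (PySem.Chars.upperChar c) 0 = dv c := rfl
theorem rv_def (d : Int) : revMapA.getD d ' ' = rv d := rfl

theorem hex_no_sign : ∀ c ∈ hexChars, ¬(c = '+' ∨ c = '-') := by
  intro c hc; fin_cases hc <;> decide
set_option maxRecDepth 8192 in
theorem dv_bound : ∀ c ∈ hexChars, 0 ≤ dv c ∧ dv c < 16 := by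
  intro c hc; fin_cases hc <;> decide
set_option maxRecDepth 8192 in
theorem dvB_eq_dv : ∀ c ∈ hexChars, digitValB c = dv c := by
  intro c hc; fin_cases hc <;> decide
set_option maxRecDepth 8192 in
theorem rv_getD (i : Int) (h0 : 0 ≤ i) (h1 : i < 16) :
    PySem.List.pyGetD hexDigitsB i ' ' = rv i := by
  interval_cases i <;> decide

theorem zfill_hex (cs : List Char) (w : Int) (_h0 : 0 ≤ w) (hw : (cs.length : Int) ≤ w)
    (hc : ∀ c ∈ cs, c ∈ hexChars) :
    PySem.Chars.zfill cs w = List.replicate (w.toNat - cs.length) '0' ++ cs := by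
  unfold PySem.Chars.zfill
  split
  · have : w = (cs.length : Int) := le_antisymm (by assumption) hw
    simp [this]
  · match cs, hc with
    | [], _ => simp
    | c :: rest, hc =>
      have := hex_no_sign c (hc c (by simp))
      simp [this]

theorem valM_replicate (k : Nat) (l : List Char) :
    valM (List.replicate k '0' ++ l) = valM l := by
  induction k with
  | zero => simp
  | succ k ih =>
    have hz : dv '0' = 0 := by decide
    simpa [valM, List.replicate_succ, hz] using ih

theorem valL_concat (xs : List Char) (c : Char) :
    valL (xs ++ [c]) = valL xs + 16 ^ xs.length * dv c := by
  induction xs with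
  | nil => simp [valL]
  | cons x t ih => simp [valL, ih, pow_succ]; ring

theorem valM_gen (l : List Char) : ∀ a : Int,
    l.foldl (fun a c => a * 16 + dv c) a = a * 16 ^ l.length + valL l.reverse := by
  induction l with
  | nil => intro a; simp [valL]
  | cons c t ih =>
    intro a
    simp only [List.foldl_cons, ih, List.reverse_cons, valL_concat, List.length_reverse,
      List.length_cons, pow_succ]
    ring

theorem valM_eq_valL_reverse (l : List Char) : valM l = valL l.reverse := by
  simpa [valM] using valM_gen l 0

-- B's parse loop computes valM on all-hex input
theorem foldl_dvB_eq (l : List Char) (hc : ∀ c ∈ l, c ∈ hexChars) : ∀ a : Int,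
    l.foldl (fun n c => n * 16 + digitValB c) a = l.foldl (fun n c => n * 16 + dv c) a := by
  induction l with
  | nil => intro a; rfl
  | cons c t ih =>
    intro a
    simp only [List.foldl_cons]
    rw [dvB_eq_dv c (hc c (by simp))]
    exact ih (fun x hx => hc x (by simp [hx])) _

theorem parseB_eq_valM (l : List Char) (hc : ∀ c ∈ l, c ∈ hexChars) :
    parseB l = valM l := foldl_dvB_eq l hc 0

-- B's prepend loop builds A's LSB-first digit list, reversed
theorem emit_fold (l : List Int) : ∀ (out : List Char) (d : Int), 0 ≤ d →
    (l.foldl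
      (fun (st : List Char × Int) _ =>
        (PySem.List.pyGetD hexDigitsB (PySem.Int.mod st.2 16) ' ' :: st.1,
         PySem.Int.floordiv st.2 16)) (out, d)).1
    = ((D16 d l.length).map rv).reverse ++ out := by
  induction l with
  | nil => intro out d _; simp [D16]
  | cons x t ih =>
    intro out d hd
    have h16 : (0:Int) < 16 := by norm_num
    simp only [List.foldl_cons, PySem.Int.mod_eq_emod_of_pos h16,
      PySem.Int.floordiv_eq_ediv_of_pos h16] at ih ⊢
    rw [ih (PySem.List.pyGetD hexDigitsB (d % 16) ' ' :: out) (d / 16)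
      (Int.ediv_nonneg hd (by norm_num))]
    rw [rv_getD (d % 16) (Int.emod_nonneg d (by norm_num)) (Int.emod_lt_of_pos d h16)]
    simp [D16]

theorem emitLoopB_eq (k : Nat) (d : Int) (hd : 0 ≤ d) :
    emitLoopB (k : Int) d = ((D16 d k).map rv).reverse := by
  unfold emitLoopB
  rw [emit_fold _ [] d hd]
  simp [PySem.List.length_pyRange_one]

theorem D16_congr : ∀ (n : Nat) (m₁ m₂ : Int), m₁ % (16 ^ n : Int) = m₂ % (16 ^ n : Int) →
    D16 m₁ n = D16 m₂ n := by
  intro n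
  induction n with
  | zero => intro _ _ _; rfl
  | succ n ih =>
    intro m₁ m₂ h
    have hM : Int.ModEq (16 ^ (n+1)) m₁ m₂ := h
    obtain ⟨t, ht⟩ := hM.dvd
    have ht' : m₂ - m₁ = 16 * (16 ^ n * t) := by rw [ht]; ring
    have hmod : m₁ % 16 = m₂ % 16 := by
      exact hM.of_dvd (dvd_pow_self 16 (Nat.succ_ne_zero n))
    have hq : m₂ / 16 - m₁ / 16 = 16 ^ n * t := by omega
    have hdiv : (m₁ / 16) % 16 ^ n = (m₂ / 16) % 16 ^ n :=
      Int.modEq_iff_dvd.mpr ⟨t, hq⟩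
    simp [D16, hmod, ih _ _ hdiv]

-- A's pop loop (on the LSB-first list), reversed, is B's slice + lstrip of the reversed list
theorem strip_rev (r : List Char) :
    (stripLoopA r.reverse).reverse
      = r.dropLast.dropWhile (· == '0') ++ r.drop (r.length - 1) := by
  induction r with
  | nil => simp [stripLoopA]
  | cons c t ih =>
    match t with
    | [] =>
      rw [stripLoopA]; simp
    | x :: s =>
      have hlast : ((c :: x :: s).reverse).getLast? = some c := by simp
      have h1 : (c :: x :: s).dropLast = c :: (x :: s).dropLast := by
        simp [List.dropLast_cons_of_ne_nil]
      have h2 : (c :: x :: s).drop ((c :: x :: s).length - 1)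
          = (x :: s).drop ((x :: s).length - 1) := by simp
      rw [stripLoopA]
      by_cases hc : c = '0'
      · subst hc
        rw [if_pos ⟨by simp, hlast⟩]
        rw [show ((('0' : Char) :: x :: s).reverse).dropLast = (x :: s).reverse by simp]
        rw [ih, h1, List.dropWhile_cons_of_pos (by simp), h2]
      · rw [if_neg (by
          rintro ⟨-, h⟩
          rw [hlast] at h
          injection h with h'
          exact hc h')]
        rw [List.reverse_reverse, h1,
          List.dropWhile_cons_of_neg (by simpa using hc), h2, List.cons_append,
          List.dropLast_eq_take, List.take_append_drop]

theorem sub_loop (qs : List (Char × Char)) : ∀ (res : List Char) (bor : Int),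
    (∀ p ∈ qs, p.1 ∈ hexChars ∧ p.2 ∈ hexChars) → (bor = 0 ∨ bor = 1) →
    (qs.foldl
      (fun (st : List Char × Int) p =>
        if dv p.2 + st.2 ≤ dv p.1 then (st.1 ++ [rv (dv p.1 - (dv p.2 + st.2))], (0 : Int))
        else (st.1 ++ [rv (dv p.1 + 16 - (dv p.2 + st.2))], 1)) (res, bor)).1
    = res ++ (D16 (valL (qs.map Prod.fst) - valL (qs.map Prod.snd) - bor) qs.length).map rv := by
  induction qs with
  | nil => intro res bor _ _; simp [valL, D16]
  | cons p t ih =>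
    intro res bor hmem hbor
    obtain ⟨hp1, hp2⟩ := hmem p (by simp)
    have hb1 := dv_bound p.1 hp1
    have hb2 := dv_bound p.2 hp2
    have hmem' : ∀ q ∈ t, q.1 ∈ hexChars ∧ q.2 ∈ hexChars := fun q hq => hmem q (by simp [hq])
    set k : Int := valL (t.map Prod.fst) - valL (t.map Prod.snd) with hk
    have hM : valL ((p :: t).map Prod.fst) - valL ((p :: t).map Prod.snd) - bor
        = (dv p.1 - dv p.2 - bor) + 16 * k := by
      simp [valL, hk]; ring
    simp only [List.foldl_cons]
    by_cases hge : dv p.2 + bor ≤ dv p.1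
    · rw [if_pos hge]
      rw [ih (res ++ [rv (dv p.1 - (dv p.2 + bor))]) 0 hmem' (Or.inl rfl)]
      have hd : D16 (valL ((p :: t).map Prod.fst) - valL ((p :: t).map Prod.snd) - bor) (p :: t).length
          = (dv p.1 - (dv p.2 + bor)) :: D16 (k - 0) t.length := by
        rw [hM]
        show D16 _ (t.length + 1) = _
        rw [D16]
        congr 1
        · omega
        · congr 1; omega
      rw [hd]; simp
    · rw [if_neg hge]
      rw [ih (res ++ [rv (dv p.1 + 16 - (dv p.2 + bor))]) 1 hmem' (Or.inr rfl)]
      have hd : D16 (valL ((p :: t).map Prod.fst) - valL ((p :: t).map Prod.snd) - bor) (p :: t).length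
          = (dv p.1 + 16 - (dv p.2 + bor)) :: D16 (k - 1) t.length := by
        rw [hM]
        show D16 _ (t.length + 1) = _
        rw [D16]
        congr 1
        · omega
        · congr 1; omega
      rw [hd]; simp

theorem A_loop_rev (n : Nat) : ∀ (xs ys : List Char) (init : List Char × Int),
    xs.length = n → ys.length = n →
    (PySem.List.pyRange ((n : Int) - 1) (-1) (-1)).foldl
      (fun (st : List Char × Int) i =>
        if dv (PySem.List.pyGetD ys i ' ') + st.2 ≤ dv (PySem.List.pyGetD xs i ' ')
        then (st.1 ++ [rv (dv (PySem.List.pyGetD xs i ' ') - (dv (PySem.List.pyGetD ys i ' ') + st.2))], (0 : Int))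
        else (st.1 ++ [rv (dv (PySem.List.pyGetD xs i ' ') + 16 - (dv (PySem.List.pyGetD ys i ' ') + st.2))], 1)) init
    = ((xs.zip ys).reverse).foldl
      (fun (st : List Char × Int) p =>
        if dv p.2 + st.2 ≤ dv p.1 then (st.1 ++ [rv (dv p.1 - (dv p.2 + st.2))], (0 : Int))
        else (st.1 ++ [rv (dv p.1 + 16 - (dv p.2 + st.2))], 1)) init := by
  induction n with
  | zero =>
    intro xs ys init hx hy
    rw [List.length_eq_zero_iff.mp hx, List.length_eq_zero_iff.mp hy]
    rw [PySem.List.pyRange_neg_one_eq_nil (by norm_num)]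
    rfl
  | succ n ih =>
    intro xs ys init hx hy
    obtain ⟨as, x, rfl⟩ : ∃ as x, xs = as ++ [x] := by
      rcases List.eq_nil_or_concat xs with h | ⟨as, x, h⟩
      · simp [h] at hx
      · exact ⟨as, x, by simpa [List.concat_eq_append] using h⟩
    obtain ⟨bs, y, rfl⟩ : ∃ bs y, ys = bs ++ [y] := by
      rcases List.eq_nil_or_concat ys with h | ⟨bs, y, h⟩
      · simp [h] at hy
      · exact ⟨bs, y, by simpa [List.concat_eq_append] using h⟩
    have ha : as.length = n := by simpa using hx
    have hb : bs.length = n := by simpa using hy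
    have hrange : PySem.List.pyRange (((n + 1 : Nat) : Int) - 1) (-1) (-1)
        = (n : Int) :: PySem.List.pyRange ((n : Int) - 1) (-1) (-1) := by
      have : (((n + 1 : Nat) : Int) - 1) = (n : Int) := by push_cast; ring
      rw [this, PySem.List.pyRange_neg_one_cons (by omega)]
    rw [hrange, List.foldl_cons]
    have hx0 : PySem.List.pyGetD (as ++ [x]) (n : Int) ' ' = x := by
      rw [PySem.List.pyGetD_eq_getElem _ _ (by omega) (by simp [ha])]
      have h1 : ((n : Int)).toNat = as.length := by omega
      simp [h1]
    have hy0 : PySem.List.pyGetD (bs ++ [y]) (n : Int) ' ' = y := by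
      rw [PySem.List.pyGetD_eq_getElem _ _ (by omega) (by simp [hb])]
      have h1 : ((n : Int)).toNat = bs.length := by omega
      simp [h1]
    rw [hx0, hy0]
    have hcongr : ∀ (init' : List Char × Int),
        (PySem.List.pyRange ((n : Int) - 1) (-1) (-1)).foldl
          (fun (st : List Char × Int) i =>
            if dv (PySem.List.pyGetD (bs ++ [y]) i ' ') + st.2 ≤ dv (PySem.List.pyGetD (as ++ [x]) i ' ')
            then (st.1 ++ [rv (dv (PySem.List.pyGetD (as ++ [x]) i ' ') - (dv (PySem.List.pyGetD (bs ++ [y]) i ' ') + st.2))], (0 : Int))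
            else (st.1 ++ [rv (dv (PySem.List.pyGetD (as ++ [x]) i ' ') + 16 - (dv (PySem.List.pyGetD (bs ++ [y]) i ' ') + st.2))], 1)) init'
        = (PySem.List.pyRange ((n : Int) - 1) (-1) (-1)).foldl
          (fun (st : List Char × Int) i =>
            if dv (PySem.List.pyGetD bs i ' ') + st.2 ≤ dv (PySem.List.pyGetD as i ' ')
            then (st.1 ++ [rv (dv (PySem.List.pyGetD as i ' ') - (dv (PySem.List.pyGetD bs i ' ') + st.2))], (0 : Int))
            else (st.1 ++ [rv (dv (PySem.List.pyGetD as i ' ') + 16 - (dv (PySem.List.pyGetD bs i ' ') + st.2))], 1)) init' := by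
      intro init'
      apply PySem.List.foldl_congr_mem
      intro st i hi
      have hi' := PySem.List.mem_pyRange_neg_one.mp hi
      have hga : PySem.List.pyGetD (as ++ [x]) i ' ' = PySem.List.pyGetD as i ' ' := by
        rw [PySem.List.pyGetD_eq_getElem _ _ (by omega) (by simp; omega),
            PySem.List.pyGetD_eq_getElem _ _ (by omega) (by omega)]
        rw [List.getElem_append_left (by omega)]
      have hgb : PySem.List.pyGetD (bs ++ [y]) i ' ' = PySem.List.pyGetD bs i ' ' := by
        rw [PySem.List.pyGetD_eq_getElem _ _ (by omega) (by simp; omega),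
            PySem.List.pyGetD_eq_getElem _ _ (by omega) (by omega)]
        rw [List.getElem_append_left (by omega)]
      rw [hga, hgb]
    rw [hcongr, ih as bs _ ha hb]
    rw [List.zip_append (by omega), List.reverse_append]
    rfl

-- ===== VERDICT (by name: the statement is the Claim_ definition above) =====
theorem hex_subtract_spec : Claim_equal_hex_subtract := by
  intro hex1 hex2 _ hpre
  unfold Spec_hex_subtract
  unfold Pre_hex_subtract at hpre
  simp only [Bool.and_eq_true, List.all_eq_true, List.contains_iff_mem] at hpre
  obtain ⟨hc1, hc2⟩ := hpre
  set L1 := hex1.toList with hL1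
  set L2 := hex2.toList with hL2
  set N : Nat := max L1.length L2.length with hN
  have hlen1 : hex1.length = L1.length := (String.length_toList (s := hex1)).symm
  have hlen2 : hex2.length = L2.length := (String.length_toList (s := hex2)).symm
  have hmax : max (PySem.Str.len hex1) (PySem.Str.len hex2) = (N : Int) := by
    simp [PySem.Str.len_eq, hN, Nat.cast_max, hlen1, hlen2]
  have hz1 : PySem.Chars.zfill L1 (N : Int) = List.replicate (N - L1.length) '0' ++ L1 :=
    zfill_hex L1 (N : Int) (by omega) (by rw [hN]; push_cast; omega) hc1
  have hz2 : PySem.Chars.zfill L2 (N : Int) = List.replicate (N - L2.length) '0' ++ L2 :=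
    zfill_hex L2 (N : Int) (by omega) (by rw [hN]; push_cast; omega) hc2
  set P1 := List.replicate (N - L1.length) '0' ++ L1 with hP1
  set P2 := List.replicate (N - L2.length) '0' ++ L2 with hP2
  have hP1len : P1.length = N := by simp [hP1, hN]; try omega
  have hP2len : P2.length = N := by simp [hP2, hN]; try omega
  have hmem1 : ∀ c ∈ P1, c ∈ hexChars := by
    intro c hc
    rcases List.mem_append.mp hc with h | h
    · rw [List.eq_of_mem_replicate h]; decide
    · exact hc1 c h
  have hmem2 : ∀ c ∈ P2, c ∈ hexChars := by
    intro c hc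
    rcases List.mem_append.mp hc with h | h
    · rw [List.eq_of_mem_replicate h]; decide
    · exact hc2 c h
  have hv1 : valM P1 = valM L1 := valM_replicate _ _
  have hv2 : valM P2 = valM L2 := valM_replicate _ _
  -- A side
  have hA : hex_subtract hex1 hex2
      = String.ofList (stripLoopA ((D16 (valM L1 - valM L2) N).map rv)).reverse := by
    simp only [hex_subtract]
    rw [← hL1, ← hL2, hmax, hz1, hz2]
    simp only [ge_iff_le, dv_def, rv_def]
    rw [A_loop_rev N P1 P2 ([], 0) hP1len hP2len]
    rw [sub_loop _ [] 0
      (fun p hp => by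
        have h := List.of_mem_zip (List.mem_reverse.mp hp)
        exact ⟨hmem1 _ h.1, hmem2 _ h.2⟩) (Or.inl rfl)]
    have hf : ((P1.zip P2).reverse).map Prod.fst = P1.reverse := by
      rw [List.map_reverse, List.map_fst_zip (l₁ := P1) (l₂ := P2) (by omega)]
    have hs : ((P1.zip P2).reverse).map Prod.snd = P2.reverse := by
      rw [List.map_reverse, List.map_snd_zip (l₁ := P1) (l₂ := P2) (by omega)]
    have hlen : ((P1.zip P2).reverse).length = N := by
      simp [List.length_zip, hP1len, hP2len]
    rw [hf, hs, hlen, ← valM_eq_valL_reverse, ← valM_eq_valL_reverse, hv1, hv2]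
    simp
  have htn : ((N : Int)).toNat = N := by omega
  -- B side
  have hdiffpos : (0:Int) ≤ (valM L1 - valM L2) % (16:Int) ^ N :=
    Int.emod_nonneg _ (by positivity)
  have hB : hex_subtract_alt hex1 hex2
      = String.ofList
          ((((D16 (valM L1 - valM L2) N).map rv).reverse.dropLast.dropWhile (· == '0'))
            ++ ((D16 (valM L1 - valM L2) N).map rv).reverse.drop
                 (((D16 (valM L1 - valM L2) N).map rv).reverse.length - 1)) := by
    simp only [hex_subtract_alt]
    rw [← hL1, ← hL2, hmax, htn]
    rw [parseB_eq_valM L1 hc1, parseB_eq_valM L2 hc2]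
    rw [PySem.Int.mod_eq_emod_of_pos (pow_pos (by norm_num) N)]
    rw [show ((N:Int)) = ((N:Nat):Int) from rfl, emitLoopB_eq N _ hdiffpos]
    rw [D16_congr N _ _ (Int.emod_emod_of_dvd _ dvd_rfl)]
    rw [PySem.List.slice_to_neg_one, PySem.List.slice_from_neg_one]
  rw [hA, hB]
  have := strip_rev ((D16 (valM L1 - valM L2) N).map rv).reverse
  rw [List.reverse_reverse] at this
  rw [this]
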